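-- pv_equiv track=rewrite | github.com/juliariera/gender-disparities-in-child-custody-sentencing-in-Spain | src/modules/data_preparation/dataset_extension.py | create_judge_map
-- ===== SOURCE A (Python) =====
-- def create_judge_map(judge_name_list):
--     judge_map = {}
--     judge_id = 0
--
--     for judge_name in judge_name_list:
--         if judge_name not in judge_map:
--             judge_map[judge_name] = judge_id
--             judge_id += 1
--
--     return judge_map
-- ===== SOURCE B (Python) =====
-- def create_judge_map(judge_name_list):
--     # selection by repeated filtering: take the first remaining name, give it
--     # the next id, drop all of its occurrences, and repeat on what is left
--     judge_map = {}
--     rest = list(judge_name_list)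
--     judge_id = 0
--     while rest:
--         head = rest[0]
--         judge_map[head] = judge_id
--         judge_id += 1
--         rest = [x for x in rest[1:] if x != head]
--     return judge_map
-- ===== Notes on version B (the rewrite author's own statement) =====
-- stated objective: alternative
-- what changed: Replaces the single seen-dict pass with a running counter by a selection loop with no membership test: repeatedly take the first remaining name, assign the next id, and filter out all its occurrences.
import Mathlib
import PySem

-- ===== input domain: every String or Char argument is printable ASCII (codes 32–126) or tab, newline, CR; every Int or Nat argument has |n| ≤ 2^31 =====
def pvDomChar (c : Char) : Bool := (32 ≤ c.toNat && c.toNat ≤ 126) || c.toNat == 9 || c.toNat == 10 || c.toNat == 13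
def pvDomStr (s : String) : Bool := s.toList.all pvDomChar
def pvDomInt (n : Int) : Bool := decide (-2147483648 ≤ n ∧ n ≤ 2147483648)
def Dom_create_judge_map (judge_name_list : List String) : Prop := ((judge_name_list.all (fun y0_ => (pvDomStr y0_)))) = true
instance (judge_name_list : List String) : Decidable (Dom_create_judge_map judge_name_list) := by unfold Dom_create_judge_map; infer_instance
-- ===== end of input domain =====

-- B replaces A's seen-dict counter loop by a selection loop: take the first remaining name, assign the next id, filter out its occurrences; objective: alternative (not faster).


-- ===== PORT A =====
-- judge_map = {}; judge_id = 0; for name in list: if name not in judge_map: insert; id += 1; return judge_map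
def create_judge_map (judge_name_list : List String) : List (String × Int) :=
  (judge_name_list.foldl
    (fun (st : PySem.Dict String Int × Int) judge_name =>
      if st.1.contains judge_name = false then (st.1.insert judge_name st.2, st.2 + 1) else st)
    (PySem.Dict.empty, 0)).1.items

-- ===== PORT B =====
-- while rest: head = rest[0]; judge_map[head] = judge_id; judge_id += 1; rest = [x for x in rest[1:] if x != head]
-- (head is filtered out of the remainder, so each key is inserted exactly once: the dict's items are the pairs in loop order)
def cjmAltGo : List String → Int → List (String × Int)
  | [], _ => []
  | head :: rest, judge_id =>
      (head, judge_id) :: cjmAltGo (rest.filter (fun x => x ≠ head)) (judge_id + 1)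
termination_by l _ => l.length
decreasing_by
  simp only [List.length_cons, List.length_unattach]
  exact Nat.lt_succ_of_le (le_trans (List.length_filter_le _ _) (by simp))

def create_judge_map_alt (judge_name_list : List String) : List (String × Int) :=
  cjmAltGo judge_name_list 0

-- ===== PRECONDITION & SPEC =====
def Spec_create_judge_map (judge_name_list : List String) (out : List (String × Int)) : Prop := out = create_judge_map_alt judge_name_list
instance (judge_name_list : List String) (out : List (String × Int)) : Decidable (Spec_create_judge_map judge_name_list out) := by unfold Spec_create_judge_map; infer_instance

-- ===== CLAIM (what is proved, stated in full; the proofs are below) =====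
def Claim_equal_create_judge_map : Prop := ∀ (judge_name_list : List String), Dom_create_judge_map judge_name_list → Spec_create_judge_map judge_name_list (create_judge_map judge_name_list)

-- ===== LEMMAS AND PROOFS =====

-- the new distinct names, in first-occurrence order, given the names already seen (characterises A's loop)
def cjmGo (seen : List String) : List String → List String
  | [] => []
  | x :: xs => if seen.contains x then cjmGo seen xs else x :: cjmGo (seen ++ [x]) xs

theorem cjmGo_loop (l : List String) (d : PySem.Dict String Int) (n : Int) :
    (l.foldl
      (fun (st : PySem.Dict String Int × Int) judge_name =>
        if st.1.contains judge_name = false then (st.1.insert judge_name st.2, st.2 + 1) else st)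
      (d, n)).1.items
    = d.items ++ (PySem.List.enumerate (cjmGo d.keys l) n).map (fun p => (p.2, p.1)) := by
  induction l generalizing d n with
  | nil => simp [cjmGo]
  | cons x xs ih =>
    simp only [List.foldl_cons, cjmGo]
    by_cases h : d.contains x = true
    · have hk : d.keys.contains x = true := by
        rw [List.contains_iff_mem]
        exact (PySem.Dict.contains_iff_mem_keys d x).mp h
      simp only [h, hk, if_true, Bool.true_eq_false, if_false]
      exact ih d n
    · have h' : d.contains x = false := by simpa using h
      have hk : d.keys.contains x = false := by
        rw [Bool.eq_false_iff]
        intro hc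
        rw [List.contains_iff_mem] at hc
        exact h ((PySem.Dict.contains_iff_mem_keys d x).mpr hc)
      simp only [h', hk, if_true, Bool.false_eq_true, if_false]
      rw [ih (d.insert x n) (n + 1),
          PySem.Dict.items_insert_of_not_contains d n h',
          PySem.Dict.keys_insert_of_not_contains d n h',
          List.append_assoc]
      simp [PySem.List.enumerate_cons]

-- selection-style dedup: the list of heads B's loop picks
def cjmSel : List String → List String
  | [] => []
  | x :: xs => x :: cjmSel (xs.filter (fun y => y ≠ x))
termination_by l => l.length
decreasing_by
  simp only [List.length_cons, List.length_unattach]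
  exact Nat.lt_succ_of_le (le_trans (List.length_filter_le _ _) (by simp))

-- the attach/unattach wrapper the well-founded compiler inserts, removed
theorem cjmUnattachFilter (xs : List String) (x : String) :
    (List.filter (fun (y : {a // a ∈ xs}) => decide (y.1 ≠ x)) xs.attach).unattach
      = List.filter (fun y => decide (y ≠ x)) xs := by
  rw [List.unattach_filter (g := fun y => decide (y ≠ x)) (hf := fun a h => rfl),
      List.unattach_attach]

theorem cjmAltGo_eq_enum_sel (l : List String) (n : Int) :
    cjmAltGo l n = (PySem.List.enumerate (cjmSel l) n).map (fun p => (p.2, p.1)) := by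
  induction l using cjmSel.induct generalizing n with
  | case1 => simp [cjmAltGo, cjmSel]
  | case2 x xs ih =>
    have ih' := ih (n + 1)
    simp only [cjmUnattachFilter] at ih'
    rw [cjmAltGo, cjmSel, PySem.List.enumerate_cons]
    simp only [List.map_cons]
    exact congrArg _ ih'

-- A's seen-guarded scan equals B's filtering selection, once the seen names are pre-filtered away
theorem cjmGo_eq_sel (l : List String) (seen : List String) :
    cjmGo seen l = cjmSel (l.filter (fun y => !seen.contains y)) := by
  induction l generalizing seen with
  | nil => simp [cjmGo, cjmSel]
  | cons x xs ih =>
    by_cases h : seen.contains x = true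
    · rw [cjmGo]
      simp only [h, if_true, List.filter_cons, Bool.not_true, Bool.false_eq_true, if_false]
      exact ih seen
    · have h' : seen.contains x = false := by simpa using h
      rw [cjmGo]
      simp only [h', Bool.false_eq_true, if_false, List.filter_cons]
      simp only [Bool.not_false, if_true]
      rw [cjmSel]
      congr 1
      rw [ih (seen ++ [x]), List.filter_filter]
      congr 1
      apply List.filter_congr
      intro y _
      simp [Bool.not_or, List.contains_eq_mem, eq_comm, Bool.and_comm]

-- ===== VERDICT (by name: the statement is the Claim_ definition above) =====
theorem create_judge_map_spec : Claim_equal_create_judge_map := by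
  intro l _
  unfold Spec_create_judge_map create_judge_map create_judge_map_alt
  rw [cjmGo_loop l PySem.Dict.empty 0, cjmAltGo_eq_enum_sel]
  have h : cjmGo ((PySem.Dict.empty : PySem.Dict String Int).keys) l = cjmSel l := by
    rw [show (PySem.Dict.empty : PySem.Dict String Int).keys = ([] : List String) from rfl,
        cjmGo_eq_sel]
    simp
  rw [h]
  simp [PySem.Dict.empty]
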